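-- pv_equiv track=rewrite | github.com/gianmillare/Codewars | python/6_kyu/build_tower.py | tower_builder
-- ===== SOURCE A (Python) =====
-- def tower_builder(n):
--     if n == 1:
--         return ['*']
--     else:
--         length = n + (n - 1)
--         ans = []
--
--         for star in range(1, length + 1, 2):
--             spaces = length - star
--             sep = ' ' * int(spaces / 2)
--             stars = '*' * star
--             ans.append(sep + stars + sep)
--
--         return ans
-- ===== SOURCE B (Python) =====
-- def tower_builder(n):
--     # Incremental build: keep the current separator and star strings as running
--     # state, shrinking/growing them row by row instead of recomputing each row
--     # from an arithmetic formula.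
--     rows = []
--     sep = ' ' * (n - 1)
--     stars = '*'
--     for _ in range(n):
--         rows.append(sep + stars + sep)
--         sep = sep[1:]
--         stars += '**'
--     return rows
-- ===== Notes on version B (the rewrite author's own statement) =====
-- stated objective: alternative
-- what changed: B builds the tower from running string state (the separator shrinks by one and the star string grows by two each row) instead of recomputing each row from the odd-width arithmetic of A's range loop; B also drops A's special case for n == 1.
import Mathlib
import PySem

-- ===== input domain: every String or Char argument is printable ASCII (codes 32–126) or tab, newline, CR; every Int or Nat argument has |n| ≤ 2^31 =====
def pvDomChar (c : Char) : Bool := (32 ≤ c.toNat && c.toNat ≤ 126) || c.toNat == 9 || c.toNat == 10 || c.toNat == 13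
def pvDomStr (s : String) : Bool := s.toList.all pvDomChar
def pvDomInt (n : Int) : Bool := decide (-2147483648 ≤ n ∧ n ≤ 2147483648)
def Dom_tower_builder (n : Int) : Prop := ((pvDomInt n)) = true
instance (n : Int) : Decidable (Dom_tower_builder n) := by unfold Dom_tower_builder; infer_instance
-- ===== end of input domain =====

-- B builds the pyramid from running string state (separator shrinks, star string grows) instead of
-- A's per-row arithmetic over an odd-width range; same cost, different decomposition (objective: alternative).


-- ===== PORT A =====
-- ' ' * k  (Python string repetition: empty for k ≤ 0, which .toNat reproduces exactly)
def pyRep (c : Char) (k : Int) : String := String.ofList (List.replicate k.toNat c)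

def tower_builder (n : Int) : List String :=
  if n = 1 then ["*"]
  else
    let length := n + (n - 1)
    (PySem.List.pyRange 1 (length + 1) 2).foldl
      (fun ans star =>
        let spaces := length - star
        -- int(spaces / 2): exact as floordiv here, since inside the loop spaces is even and ≥ 0
        let sep := pyRep ' ' (PySem.Int.floordiv spaces 2)
        let stars := pyRep '*' star
        ans ++ [sep ++ stars ++ sep]) []

-- ===== PORT B =====
-- the loop body of Source B: state (rows, sep, stars), one step per remaining iteration of range(n)
def towerAltGo (rows : List String) (sep stars : List Char) : Nat → List String
  | 0 => rows
  | Nat.succ k =>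
      towerAltGo (rows ++ [String.ofList (sep ++ stars ++ sep)]) (sep.drop 1) (stars ++ ['*', '*']) k

def tower_builder_alt (n : Int) : List String :=
  towerAltGo [] (List.replicate (n - 1).toNat ' ') ['*'] n.toNat

-- ===== PRECONDITION & SPEC =====
def Spec_tower_builder (n : Int) (out : List String) : Prop := out = tower_builder_alt n
instance (n : Int) (out : List String) : Decidable (Spec_tower_builder n out) := by unfold Spec_tower_builder; infer_instance

-- ===== CLAIM (what is proved, stated in full; the proofs are below) =====
def Claim_equal_tower_builder : Prop := ∀ (n : Int), Dom_tower_builder n → Spec_tower_builder n (tower_builder n)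

-- ===== LEMMAS AND PROOFS =====

-- the row both programs produce, 0-indexed row k of an m-row tower
def pvRow (m k : Nat) : String :=
  String.ofList (List.replicate (m - 1 - k) ' ' ++ List.replicate (2 * k + 1) '*' ++ List.replicate (m - 1 - k) ' ')

theorem foldl_append_map {α β : Type} (f : α → β) (l : List α) (acc : List β) :
    l.foldl (fun ans x => ans ++ [f x]) acc = acc ++ l.map f := by
  induction l generalizing acc with
  | nil => simp
  | cons a t ih => simp [List.foldl, ih]

theorem towerAltGo_eq (k : Nat) (rows : List String) (sep stars : List Char) :
    towerAltGo rows sep stars k =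
      rows ++ (List.range k).map
        (fun i => String.ofList (sep.drop i ++ (stars ++ List.replicate (2 * i) '*') ++ sep.drop i)) := by
  induction k generalizing rows sep stars with
  | zero => simp [towerAltGo]
  | succ k ih =>
      rw [towerAltGo, ih, List.range_succ_eq_map, List.map_cons, List.map_map]
      have hmap : ∀ a ∈ List.range k,
          String.ofList ((sep.drop 1).drop a ++ ((stars ++ ['*', '*']) ++ List.replicate (2 * a) '*')
              ++ (sep.drop 1).drop a)
            = ((fun i => String.ofList (sep.drop i ++ (stars ++ List.replicate (2 * i) '*')
                ++ sep.drop i)) ∘ Nat.succ) a := by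
        intro a _
        show _ = String.ofList (sep.drop (a + 1) ++ (stars ++ List.replicate (2 * (a + 1)) '*')
            ++ sep.drop (a + 1))
        have hd : (sep.drop 1).drop a = sep.drop (a + 1) := by
          rw [List.drop_drop]
          congr 1
          omega
        have hr : List.replicate (2 * (a + 1)) '*' = '*' :: '*' :: List.replicate (2 * a) '*' := by
          have h2 : 2 * (a + 1) = 2 * a + 1 + 1 := by omega
          rw [h2, List.replicate_succ, List.replicate_succ]
        rw [hd, hr]
        simp [List.append_assoc]
      rw [List.map_congr_left hmap]
      simp [List.append_assoc]

theorem alt_eq_rows (n : Int) (hn : 1 ≤ n) :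
    tower_builder_alt n = (List.range n.toNat).map (pvRow n.toNat) := by
  unfold tower_builder_alt
  rw [towerAltGo_eq]
  simp only [List.nil_append]
  apply List.map_congr_left
  intro i hi
  rw [List.mem_range] at hi
  unfold pvRow
  have h1 : (List.replicate (n - 1).toNat ' ').drop i = List.replicate (n.toNat - 1 - i) ' ' := by
    rw [List.drop_replicate]
    congr 1
    omega
  rw [h1]
  simp [List.replicate_succ, List.append_assoc]

theorem a_eq_rows (n : Int) (hn : 1 ≤ n) :
    tower_builder n = (List.range n.toNat).map (pvRow n.toNat) := by
  by_cases h1 : n = 1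
  · subst h1
    decide
  · unfold tower_builder
    rw [if_neg h1]
    simp only []
    have hlt : (1 : Int) < (n + (n - 1)) + 1 := by omega
    rw [PySem.List.pyRange_of_pos _ _ (by norm_num), if_pos hlt]
    have hcnt : (((n + (n - 1)) + 1 - 1 + 2 - 1) / 2).toNat = n.toNat := by
      have : (n + (n - 1)) + 1 - 1 + 2 - 1 = 2 * n := by ring
      rw [this]
      have : (2 * n) / 2 = n := by omega
      rw [this]
    rw [hcnt, List.foldl_map, foldl_append_map, List.nil_append]
    apply List.map_congr_left
    intro k hk
    rw [List.mem_range] at hk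
    unfold pvRow pyRep
    have hsp : PySem.Int.floordiv (n + (n - 1) - (1 + 2 * (k : Int))) 2 = n - 1 - k := by
      have he : n + (n - 1) - (1 + 2 * (k : Int)) = (n - 1 - k) * 2 := by ring
      rw [he, PySem.Int.floordiv_eq_ediv_of_pos (by norm_num)]
      omega
    rw [hsp]
    have h2 : (n - 1 - (k : Int)).toNat = n.toNat - 1 - k := by omega
    have h3 : ((1 : Int) + 2 * (k : Int)).toNat = 2 * k + 1 := by omega
    rw [h2, h3]
    simp [← String.ofList_append]


theorem nonpos_both (n : Int) (hn : n ≤ 0) :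
    tower_builder n = tower_builder_alt n := by
  unfold tower_builder tower_builder_alt
  rw [if_neg (by omega)]
  simp only []
  have hz : n.toNat = 0 := by omega
  rw [hz]
  have hnil : PySem.List.pyRange 1 ((n + (n - 1)) + 1) 2 = [] := by
    rw [PySem.List.pyRange_of_pos _ _ (by norm_num), if_neg (by omega)]
    simp
  rw [hnil]
  rfl

-- ===== VERDICT (by name: the statement is the Claim_ definition above) =====
theorem tower_builder_spec : Claim_equal_tower_builder := by
  intro n _
  unfold Spec_tower_builder
  by_cases hn : 1 ≤ n
  · rw [a_eq_rows n hn, alt_eq_rows n hn]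
  · exact nonpos_both n (by omega)
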